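-- pv_equiv track=rewrite | github.com/J41RO/MeStore | .workspace/surgical_modifier/utils/content_handler_v53.py | _preserve_python_indentation
-- ===== SOURCE A (Python) =====
-- def _preserve_python_indentation(content: str) -> str:
--     """Preservar indentación Python"""
--     lines = content.split('\n')
--     preserved_lines = []
--
--     for line in lines:
--         # Preservar indentación existente
--         if line.strip():
--             preserved_lines.append(line)
--         else:
--             preserved_lines.append('')
--
--     return '\n'.join(preserved_lines)
-- ===== SOURCE B (Python) =====
-- def _preserve_python_indentation(content: str) -> str:
--     # Single left-to-right character scan (state machine) instead of split/loop/join.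
--     res = []
--     buf = []
--     has_content = False
--     for ch in content:
--         if ch == '\n':
--             res.append(''.join(buf) if has_content else '')
--             res.append('\n')
--             buf = []
--             has_content = False
--         else:
--             buf.append(ch)
--             if not ch.isspace():
--                 has_content = True
--     res.append(''.join(buf) if has_content else '')
--     return ''.join(res)
-- ===== Notes on version B (the rewrite author's own statement) =====
-- stated objective: alternative
-- what changed: Replaces the line-splitting plus per-line strip plus list-append plus join pipeline with a single left-to-right character scan that tracks the current line buffer and a has-non-whitespace flag, emitting each line (or the empty line) as it ends.
import Mathlib
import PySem

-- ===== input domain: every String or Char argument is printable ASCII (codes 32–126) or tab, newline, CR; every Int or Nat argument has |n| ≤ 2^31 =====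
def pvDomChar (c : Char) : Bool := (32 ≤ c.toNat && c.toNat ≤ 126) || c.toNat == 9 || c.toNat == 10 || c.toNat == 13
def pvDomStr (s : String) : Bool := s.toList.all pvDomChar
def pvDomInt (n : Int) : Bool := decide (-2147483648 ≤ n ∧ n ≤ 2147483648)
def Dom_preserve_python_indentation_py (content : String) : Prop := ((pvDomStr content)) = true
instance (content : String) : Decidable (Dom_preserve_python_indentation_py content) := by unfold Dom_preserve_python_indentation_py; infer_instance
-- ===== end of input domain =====

-- B replaces A's split/strip-per-line/join with a single character scan; equivalence of return values is proved below.
-- ===== PORT A =====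
def preserve_python_indentation_py (content : String) : String :=
  let lines := PySem.Chars.splitOn content.toList ['\n']
  let preserved := lines.foldl (fun acc line =>
    if PySem.Chars.strip line ≠ [] then acc ++ [line] else acc ++ [[]]) []
  String.ofList (PySem.Chars.join ['\n'] preserved)

-- ===== PORT B =====
-- one pass over the characters: buf = current line so far, has = line contains a non-whitespace char
def pvScan : List Char → List Char → Bool → List Char
  | [], buf, has => if has then buf else []
  | c :: rest, buf, has =>
    if c = '\n' then (if has then buf else []) ++ '\n' :: pvScan rest [] false
    else pvScan rest (buf ++ [c]) (has || !PySem.Chars.isspace c)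

def preserve_python_indentation_py_alt (content : String) : String :=
  String.ofList (pvScan content.toList [] false)

-- ===== PRECONDITION & SPEC =====
def Spec_preserve_python_indentation_py (content : String) (out : String) : Prop := out = preserve_python_indentation_py_alt content
instance (content : String) (out : String) : Decidable (Spec_preserve_python_indentation_py content out) := by unfold Spec_preserve_python_indentation_py; infer_instance

-- ===== CLAIM (what is proved, stated in full; the proofs are below) =====
def Claim_equal_preserve_python_indentation_py : Prop := ∀ (content : String), Dom_preserve_python_indentation_py content → Spec_preserve_python_indentation_py content (preserve_python_indentation_py content)

-- ===== LEMMAS AND PROOFS =====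

-- reference decomposition of a char list into '\n'-separated lines (proof-only)
def pvLines : List Char → List (List Char)
  | [] => [[]]
  | c :: cs => if c = '\n' then [] :: pvLines cs else (pvLines cs).modifyHead (c :: ·)

-- the per-line normalization both programs perform
def pvFix (l : List Char) : List Char := if PySem.Chars.strip l ≠ [] then l else []

lemma pvLines_ne_nil (cs : List Char) : pvLines cs ≠ [] := by
  induction cs with
  | nil => simp [pvLines]
  | cons c cs ih =>
    simp only [pvLines]
    split
    · simp
    · rcases hp : pvLines cs with _ | ⟨h, t⟩
      · exact absurd hp ih
      · simp

lemma pv_modifyHead_id {α : Type} (l : List α) : l.modifyHead (fun x => x) = l := by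
  cases l <;> simp

lemma splitOn_go_spec (fuel : Nat) (l cur acc) (h : l.length ≤ fuel) :
    PySem.Chars.splitOn.go ['\n'] (fuel + 1) l cur acc
      = acc.reverse ++ (pvLines l).modifyHead (cur.reverse ++ ·) := by
  induction fuel generalizing l cur acc with
  | zero =>
    have hl : l = [] := List.eq_nil_of_length_eq_zero (Nat.le_zero.mp h)
    subst hl
    simp [PySem.Chars.splitOn.go, pvLines]
  | succ f ih =>
    cases l with
    | nil => simp [PySem.Chars.splitOn.go, pvLines]
    | cons c rest =>
      have hrest : rest.length ≤ f := by simpa using h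
      by_cases hc : c = '\n'
      · subst hc
        have hstep : PySem.Chars.splitOn.go ['\n'] (f + 1 + 1) ('\n' :: rest) cur acc
            = PySem.Chars.splitOn.go ['\n'] (f + 1) rest [] (cur.reverse :: acc) := by
          simp [PySem.Chars.splitOn.go, List.isPrefixOf]
        rw [hstep, ih rest [] (cur.reverse :: acc) hrest]
        simp [pvLines, pv_modifyHead_id]
      · have hstep : PySem.Chars.splitOn.go ['\n'] (f + 1 + 1) (c :: rest) cur acc
            = PySem.Chars.splitOn.go ['\n'] (f + 1) rest (c :: cur) acc := by
          simp only [PySem.Chars.splitOn.go, List.isPrefixOf]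
          simp [beq_iff_eq, Ne.symm hc]
        rw [hstep, ih rest (c :: cur) acc hrest]
        simp [pvLines, hc, List.modifyHead_modifyHead, Function.comp_def]

lemma splitOn_eq_pvLines (cs : List Char) :
    PySem.Chars.splitOn cs ['\n'] = pvLines cs := by
  have := splitOn_go_spec cs.length cs [] [] (Nat.le_refl _)
  simpa [PySem.Chars.splitOn, pv_modifyHead_id] using this

lemma strip_ne_nil_iff (cs : List Char) :
    (PySem.Chars.strip cs ≠ []) ↔ cs.any (fun c => !PySem.Chars.isspace c) = true := by
  rw [Ne, ← not_iff_not]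
  simp only [PySem.Chars.strip, PySem.Chars.rstrip, PySem.Chars.lstrip, not_not,
    List.reverse_eq_nil_iff, List.dropWhile_eq_nil_iff, List.mem_reverse,
    List.any_eq_false, Bool.not_eq_true, Bool.not_eq_false']
  constructor
  · intro h x hx
    have hx' : x ∈ cs.takeWhile PySem.Chars.isspace ++ cs.dropWhile PySem.Chars.isspace := by
      rw [List.takeWhile_append_dropWhile]; exact hx
    rcases List.mem_append.mp hx' with h1 | h2
    · exact List.mem_takeWhile_imp h1
    · exact h x h2
  · intro h x hx
    exact h x ((List.dropWhile_sublist _).mem hx)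

lemma if_any_eq_pvFix (buf : List Char) :
    (if buf.any (fun c => !PySem.Chars.isspace c) then buf else []) = pvFix buf := by
  unfold pvFix
  by_cases hb : buf.any (fun c => !PySem.Chars.isspace c) = true
  · rw [if_pos hb, if_pos ((strip_ne_nil_iff buf).mpr hb)]
  · rw [if_neg (by simpa using hb), if_neg (fun hs => hb ((strip_ne_nil_iff buf).mp hs))]

lemma pvScan_spec (cs buf : List Char) :
    pvScan cs buf (buf.any (fun c => !PySem.Chars.isspace c))
      = PySem.Chars.join ['\n'] (((pvLines cs).modifyHead (buf ++ ·)).map pvFix) := by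
  induction cs generalizing buf with
  | nil =>
    simp only [pvScan, pvLines, List.modifyHead_cons, List.map_cons, List.map_nil,
      List.append_nil]
    rw [if_any_eq_pvFix]
    exact (PySem.Chars.join_singleton ['\n'] (pvFix buf)).symm
  | cons c rest ih =>
    by_cases hc : c = '\n'
    · subst hc
      rcases hL : pvLines rest with _ | ⟨h0, t0⟩
      · exact absurd hL (pvLines_ne_nil rest)
      · have hrest := ih []
        simp only [List.any_nil, List.nil_append, pv_modifyHead_id] at hrest
        show (if buf.any (fun c => !PySem.Chars.isspace c) then buf else [])
            ++ '\n' :: pvScan rest [] false = _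
        rw [if_any_eq_pvFix, hrest, hL]
        simp only [pvLines, if_true, List.modifyHead_cons, List.map_cons, hL]
        rw [PySem.Chars.join_cons_cons]
        simp
    · have step : pvScan (c :: rest) buf (buf.any (fun x => !PySem.Chars.isspace x))
          = pvScan rest (buf ++ [c]) ((buf ++ [c]).any (fun x => !PySem.Chars.isspace x)) := by
        simp [pvScan, hc, List.any_append]
      rw [step, ih (buf ++ [c])]
      simp [pvLines, hc, List.modifyHead_modifyHead, Function.comp_def]

lemma pvScan_nil_spec (cs : List Char) :
    pvScan cs [] false = PySem.Chars.join ['\n'] ((pvLines cs).map pvFix) := by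
  have := pvScan_spec cs []
  simpa [pv_modifyHead_id] using this

lemma foldA (lines : List (List Char)) (acc : List (List Char)) :
    List.foldl (fun acc line => if PySem.Chars.strip line ≠ [] then acc ++ [line] else acc ++ [[]])
      acc lines = acc ++ lines.map pvFix := by
  induction lines generalizing acc with
  | nil => simp
  | cons l ls ih =>
    simp only [List.foldl_cons, ih, List.map_cons]
    unfold pvFix
    split_ifs <;> simp

-- ===== VERDICT (by name: the statement is the Claim_ definition above) =====
theorem preserve_python_indentation_py_spec : Claim_equal_preserve_python_indentation_py := by
  intro content _
  unfold Spec_preserve_python_indentation_py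
  simp only [preserve_python_indentation_py, preserve_python_indentation_py_alt,
    splitOn_eq_pvLines, foldA, pvScan_nil_spec, List.nil_append]
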